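-- pv_equiv track=rewrite | github.com/sshmatrix/indexit | backend/src/rarity.py | pythagoreanPrime
-- ===== SOURCE A (Python) =====
-- def pythagoreanPrime(num): #47
--     flag = False
--     counter = 1
--     while flag == False and 4*counter + 1 <= num:
--         if 4*counter + 1 == num:
--             flag = True
--             break
--         counter += 1
--     return(flag)
-- ===== SOURCE B (Python) =====
-- def pythagoreanPrime(num):
--     # closed form: num = 4k+1 for some positive integer k  <=>  num >= 5 and num ≡ 1 (mod 4)
--     return num >= 5 and (num - 1) % 4 == 0
-- ===== Notes on version B (the rewrite author's own statement) =====
-- stated objective: faster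
-- what changed: Replaced the linear search over counter values with the O(1) arithmetic test num >= 5 and (num-1) % 4 == 0.
import Mathlib
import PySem

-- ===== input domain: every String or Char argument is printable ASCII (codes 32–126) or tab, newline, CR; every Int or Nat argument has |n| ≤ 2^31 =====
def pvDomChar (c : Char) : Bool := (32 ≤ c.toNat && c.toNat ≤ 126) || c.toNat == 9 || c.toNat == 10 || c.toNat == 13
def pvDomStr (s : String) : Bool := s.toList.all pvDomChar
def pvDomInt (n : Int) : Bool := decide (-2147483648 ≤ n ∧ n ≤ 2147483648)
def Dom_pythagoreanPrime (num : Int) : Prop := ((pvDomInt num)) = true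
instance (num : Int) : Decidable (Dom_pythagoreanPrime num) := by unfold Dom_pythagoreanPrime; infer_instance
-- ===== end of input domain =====

-- B replaces A's linear counter search with the O(1) test num >= 5 && (num-1) % 4 == 0 (same return value).


-- ===== PORT A =====
-- the while loop: flag only becomes true at the break, so the loop is a search for
-- the first counter with 4*counter+1 == num, stopping when 4*counter+1 > num
def pythagoreanPrimeLoop (num counter : Int) : Bool :=
  if _h : 4 * counter + 1 ≤ num then
    if 4 * counter + 1 == num then true
    else pythagoreanPrimeLoop num (counter + 1)
  else false
termination_by (num - 4 * counter).toNat
decreasing_by omega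

def pythagoreanPrime (num : Int) : Bool :=
  pythagoreanPrimeLoop num 1

-- ===== PORT B =====
def pythagoreanPrime_alt (num : Int) : Bool :=
  decide (num ≥ 5) && (PySem.Int.mod (num - 1) 4 == 0)

-- ===== PRECONDITION & SPEC =====
def Spec_pythagoreanPrime (num : Int) (out : Bool) : Prop := out = pythagoreanPrime_alt num
instance (num : Int) (out : Bool) : Decidable (Spec_pythagoreanPrime num out) := by unfold Spec_pythagoreanPrime; infer_instance

-- ===== CLAIM (what is proved, stated in full; the proofs are below) =====
def Claim_equal_pythagoreanPrime : Prop := ∀ (num : Int), Dom_pythagoreanPrime num → Spec_pythagoreanPrime num (pythagoreanPrime num)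

-- ===== LEMMAS AND PROOFS =====

-- loop characterisation: starting at any counter c, the loop returns true iff
-- num is still reachable (4*c+1 <= num) and num ≡ 1 (mod 4)
theorem pythagoreanPrimeLoop_eq (num c : Int) :
    pythagoreanPrimeLoop num c = decide (4 * c + 1 ≤ num ∧ (num - 1) % 4 = 0) := by
  rw [pythagoreanPrimeLoop]
  by_cases h : 4 * c + 1 ≤ num
  · rw [dif_pos h]
    by_cases he : 4 * c + 1 = num
    · have hc : (4 * c + 1 ≤ num ∧ (num - 1) % 4 = 0) := ⟨le_of_eq he, by omega⟩
      simp [he, hc]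
    · have hne : (4 * c + 1 == num) = false := by simp [he]
      rw [hne]
      simp only [Bool.false_eq_true, if_false]
      rw [pythagoreanPrimeLoop_eq num (c + 1)]
      simp only [decide_eq_decide]
      constructor
      · rintro ⟨h1, h2⟩; exact ⟨by omega, h2⟩
      · rintro ⟨h1, h2⟩; exact ⟨by omega, h2⟩
  · rw [dif_neg h]
    have hd : decide (4 * c + 1 ≤ num ∧ (num - 1) % 4 = 0) = false := by
      simp only [decide_eq_false_iff_not]
      exact fun hc => h hc.1
    rw [hd]
termination_by (num - 4 * c).toNat
decreasing_by omega

-- ===== VERDICT (by name: the statement is the Claim_ definition above) =====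
theorem pythagoreanPrime_spec : Claim_equal_pythagoreanPrime := by
  intro num _
  show pythagoreanPrime num = pythagoreanPrime_alt num
  rw [pythagoreanPrime, pythagoreanPrimeLoop_eq, pythagoreanPrime_alt,
      PySem.Int.mod_eq_emod_of_pos (by norm_num)]
  by_cases h : 4 * 1 + 1 ≤ num ∧ (num - 1) % 4 = 0
  · have h5 : num ≥ 5 := by omega
    simp [h, h5]
  · rcases not_and_or.mp h with h' | h'
    · have hn : ¬ (num ≥ 5) := by omega
      simp [hn]
    · simp [h']
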